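-- pv_equiv track=rewrite | github.com/Shivsrijit/EduScope | ml_model/yolo_model.py | _categorize_objects
-- ===== SOURCE A (Python) =====
-- def _categorize_objects(objects):
--     """Categorize detected objects into educational domains"""
--     categories = {
--         'art_supplies': [],
--         'electronics': [],
--         'lab_equipment': [],
--         'educational_materials': [],
--         'other': []
--     }
--
--     # Define category mappings
--     category_mapping = {
--         'pencil': 'art_supplies',
--         'pen': 'art_supplies',
--         'book': 'educational_materials',
--         'laptop': 'electronics',
--         'bottle': 'lab_equipment',
--         # Add more mappings as needed
--     }
--
--     for obj in objects:
--         category = category_mapping.get(obj['class'], 'other')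
--         categories[category].append(obj)
--
--     return categories
-- ===== SOURCE B (Python) =====
-- def _categorize_objects(objects):
--     """Categorize detected objects into educational domains"""
--     category_mapping = {
--         'pencil': 'art_supplies',
--         'pen': 'art_supplies',
--         'book': 'educational_materials',
--         'laptop': 'electronics',
--         'bottle': 'lab_equipment',
--     }
--     objects = list(objects)
--     return {name: [obj for obj in objects
--                    if category_mapping.get(obj['class'], 'other') == name]
--             for name in ['art_supplies', 'electronics', 'lab_equipment',
--                          'educational_materials', 'other']}
-- ===== Notes on version B (the rewrite author's own statement) =====
-- stated objective: idiomatic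
-- what changed: Replaces the single dispatch loop that appends into pre-built mutable buckets with a dict comprehension that makes one filtering pass per fixed category name; empty buckets and ordering are preserved.
import Mathlib
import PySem

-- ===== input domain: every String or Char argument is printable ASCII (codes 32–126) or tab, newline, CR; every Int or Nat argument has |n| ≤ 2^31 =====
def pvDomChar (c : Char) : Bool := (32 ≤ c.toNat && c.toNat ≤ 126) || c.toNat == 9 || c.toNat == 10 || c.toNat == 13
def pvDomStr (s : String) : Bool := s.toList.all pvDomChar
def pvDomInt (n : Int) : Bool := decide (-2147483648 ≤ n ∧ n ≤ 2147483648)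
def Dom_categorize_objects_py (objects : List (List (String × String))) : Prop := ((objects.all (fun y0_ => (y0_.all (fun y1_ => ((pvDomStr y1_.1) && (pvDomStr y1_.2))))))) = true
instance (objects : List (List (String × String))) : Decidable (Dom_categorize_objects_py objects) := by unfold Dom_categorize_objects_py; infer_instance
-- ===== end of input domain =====

-- B replaces A's single dispatch loop (append into pre-built mutable buckets) with one
-- filtering pass per fixed category name (a dict comprehension); idiomatic, same result.


-- ===== PORT A =====
-- category_mapping (the same literal appears in both Pythons)
def pvCategoryMapping : PySem.Dict String String :=
  PySem.Dict.mk [("pencil", "art_supplies"), ("pen", "art_supplies"),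
                 ("book", "educational_materials"), ("laptop", "electronics"),
                 ("bottle", "lab_equipment")]

-- category_mapping.get(obj['class'], 'other'); obj['class'] is a first-match lookup
-- (KeyError, i.e. get? = none, is excluded by Pre_ below; the "" default is unreachable there)
def pvCat (obj : List (String × String)) : String :=
  pvCategoryMapping.getD (((PySem.Dict.mk obj).get? "class").getD "") "other"

def categorize_objects_py (objects : List (List (String × String))) :
    List (String × List (List (String × String))) :=
  let categories : PySem.Dict String (List (List (String × String))) :=
    PySem.Dict.mk [("art_supplies", []), ("electronics", []), ("lab_equipment", []),
                   ("educational_materials", []), ("other", [])]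
  -- for obj in objects: categories[category].append(obj)
  let final := objects.foldl (fun cats obj => cats.modify (pvCat obj) [] (fun l => l ++ [obj])) categories
  final.items

-- ===== PORT B =====
def categorize_objects_py_alt (objects : List (List (String × String))) :
    List (String × List (List (String × String))) :=
  ["art_supplies", "electronics", "lab_equipment", "educational_materials", "other"].map
    (fun name => (name, objects.filter (fun obj => pvCat obj == name)))

-- ===== PRECONDITION & SPEC =====
-- Pre_ excludes objects lacking a 'class' key, on which the Python (A and B alike) raises KeyError.
def Pre_categorize_objects_py (objects : List (List (String × String))) : Prop :=
  ∀ obj ∈ objects, "class" ∈ obj.map Prod.fst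
instance (objects : List (List (String × String))) : Decidable (Pre_categorize_objects_py objects) := by unfold Pre_categorize_objects_py; infer_instance
def pvWitness_categorize_objects_py : (List (List (String × String))) := [[("class", "pencil")], [("class", "dog")]]

def Spec_categorize_objects_py (objects : List (List (String × String))) (out : List (String × List (List (String × String)))) : Prop := out = categorize_objects_py_alt objects
instance (objects : List (List (String × String))) (out : List (String × List (List (String × String)))) : Decidable (Spec_categorize_objects_py objects out) := by unfold Spec_categorize_objects_py; infer_instance

-- ===== CLAIM (what is proved, stated in full; the proofs are below) =====
def Claim_equal_categorize_objects_py : Prop := ∀ (objects : List (List (String × String))), Dom_categorize_objects_py objects → Pre_categorize_objects_py objects → Spec_categorize_objects_py objects (categorize_objects_py objects)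

-- ===== LEMMAS AND PROOFS =====

-- A's mapped category is always one of the five fixed bucket names.
theorem pvCat_mem (obj : List (String × String)) :
    pvCat obj = "art_supplies" ∨ pvCat obj = "electronics" ∨ pvCat obj = "lab_equipment" ∨
    pvCat obj = "educational_materials" ∨ pvCat obj = "other" := by
  unfold pvCat pvCategoryMapping
  generalize (((PySem.Dict.mk obj).get? "class").getD "") = s
  simp only [PySem.Dict.getD_eq_get?_getD, PySem.Dict.get?_mk_cons]
  by_cases h1 : "pencil" = s <;> by_cases h2 : "pen" = s <;> by_cases h3 : "book" = s <;>
    by_cases h4 : "laptop" = s <;> by_cases h5 : "bottle" = s <;>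
    simp [h1, h2, h3, h4, h5, PySem.Dict.get?]

-- loop invariant: A's fold over the five-bucket dict appends exactly B's filters
theorem pv_fold_inv (objects : List (List (String × String)))
    (a e l m o : List (List (String × String))) :
    objects.foldl (fun cats obj => cats.modify (pvCat obj) [] (fun l => l ++ [obj]))
      (PySem.Dict.mk [("art_supplies", a), ("electronics", e), ("lab_equipment", l),
                      ("educational_materials", m), ("other", o)]) =
    PySem.Dict.mk [("art_supplies", a ++ objects.filter (fun x => pvCat x == "art_supplies")),
                   ("electronics", e ++ objects.filter (fun x => pvCat x == "electronics")),
                   ("lab_equipment", l ++ objects.filter (fun x => pvCat x == "lab_equipment")),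
                   ("educational_materials", m ++ objects.filter (fun x => pvCat x == "educational_materials")),
                   ("other", o ++ objects.filter (fun x => pvCat x == "other"))] := by
  induction objects generalizing a e l m o with
  | nil => simp
  | cons h t ih =>
    rw [List.foldl_cons]
    rcases pvCat_mem h with hc | hc | hc | hc | hc <;>
      [ rw [show (PySem.Dict.mk [("art_supplies", a), ("electronics", e), ("lab_equipment", l),
            ("educational_materials", m), ("other", o)]).modify (pvCat h) [] (fun l => l ++ [h]) =
            PySem.Dict.mk [("art_supplies", a ++ [h]), ("electronics", e), ("lab_equipment", l),
            ("educational_materials", m), ("other", o)] from by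
            simp [PySem.Dict.modify, PySem.Dict.insert, PySem.Dict.getD, PySem.Dict.get?,
                  PySem.Dict.contains, hc], ih];
        rw [show (PySem.Dict.mk [("art_supplies", a), ("electronics", e), ("lab_equipment", l),
            ("educational_materials", m), ("other", o)]).modify (pvCat h) [] (fun l => l ++ [h]) =
            PySem.Dict.mk [("art_supplies", a), ("electronics", e ++ [h]), ("lab_equipment", l),
            ("educational_materials", m), ("other", o)] from by
            simp [PySem.Dict.modify, PySem.Dict.insert, PySem.Dict.getD, PySem.Dict.get?,
                  PySem.Dict.contains, hc], ih];
        rw [show (PySem.Dict.mk [("art_supplies", a), ("electronics", e), ("lab_equipment", l),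
            ("educational_materials", m), ("other", o)]).modify (pvCat h) [] (fun l => l ++ [h]) =
            PySem.Dict.mk [("art_supplies", a), ("electronics", e), ("lab_equipment", l ++ [h]),
            ("educational_materials", m), ("other", o)] from by
            simp [PySem.Dict.modify, PySem.Dict.insert, PySem.Dict.getD, PySem.Dict.get?,
                  PySem.Dict.contains, hc], ih];
        rw [show (PySem.Dict.mk [("art_supplies", a), ("electronics", e), ("lab_equipment", l),
            ("educational_materials", m), ("other", o)]).modify (pvCat h) [] (fun l => l ++ [h]) =
            PySem.Dict.mk [("art_supplies", a), ("electronics", e), ("lab_equipment", l),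
            ("educational_materials", m ++ [h]), ("other", o)] from by
            simp [PySem.Dict.modify, PySem.Dict.insert, PySem.Dict.getD, PySem.Dict.get?,
                  PySem.Dict.contains, hc], ih];
        rw [show (PySem.Dict.mk [("art_supplies", a), ("electronics", e), ("lab_equipment", l),
            ("educational_materials", m), ("other", o)]).modify (pvCat h) [] (fun l => l ++ [h]) =
            PySem.Dict.mk [("art_supplies", a), ("electronics", e), ("lab_equipment", l),
            ("educational_materials", m), ("other", o ++ [h])] from by
            simp [PySem.Dict.modify, PySem.Dict.insert, PySem.Dict.getD, PySem.Dict.get?,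
                  PySem.Dict.contains, hc], ih] ] <;>
      simp [hc]

-- ===== VERDICT (by name: the statement is the Claim_ definition above) =====
theorem categorize_objects_py_spec : Claim_equal_categorize_objects_py := by
  intro objects _ _
  unfold Spec_categorize_objects_py categorize_objects_py categorize_objects_py_alt
  simp [pv_fold_inv]
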